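-- pv_equiv track=rewrite | github.com/NWU-Recode/Recode-Backend | app/features/judge0/wrappers.py | _norm_line
-- ===== SOURCE A (Python) =====
-- def _norm_line(s: str | None) -> str | None:
--     if s is None:
--         return None
--     s2 = s.replace('\r\n', '\n').strip()
--     lines = [ln.rstrip() for ln in s2.split('\n') if ln.strip()]
--     if not lines:
--         return None
--     return lines[-1].strip()
-- ===== SOURCE B (Python) =====
-- def _norm_line(s):
--     if s is None:
--         return None
--     t = s.replace('\r\n', '\n').strip()
--     if not t:
--         return None
--     # t is stripped, so its final character is non-whitespace: the suffix after
--     # the last '\n' is exactly the last non-empty line; no line list is built.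
--     return t[t.rfind('\n') + 1:].strip()
-- ===== Notes on version B (the rewrite author's own statement) =====
-- stated objective: alternative
-- what changed: Instead of splitting into lines, filtering the non-blank ones into a list and indexing its last element, B extracts the answer in closed form: after strip() the string ends in a non-whitespace character, so the suffix after the last newline (t[t.rfind('\n')+1:]) is already the last non-empty line; no line list is built.
import Mathlib
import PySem

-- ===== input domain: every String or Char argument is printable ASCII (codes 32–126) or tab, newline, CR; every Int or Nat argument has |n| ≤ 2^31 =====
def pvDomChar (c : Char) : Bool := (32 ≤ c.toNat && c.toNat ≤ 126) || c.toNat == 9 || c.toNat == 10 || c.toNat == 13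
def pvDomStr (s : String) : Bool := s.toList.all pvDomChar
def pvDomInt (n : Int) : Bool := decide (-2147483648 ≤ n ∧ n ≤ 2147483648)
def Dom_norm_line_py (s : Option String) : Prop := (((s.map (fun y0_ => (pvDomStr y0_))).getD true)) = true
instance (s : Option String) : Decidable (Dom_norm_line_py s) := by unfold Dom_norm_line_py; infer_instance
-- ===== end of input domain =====

-- B replaces A's split-into-lines / filter / index-last pipeline by a closed-form
-- extraction: since the stripped string ends in a non-space character, the suffix
-- after the LAST '\n' (via rfind) is already the last non-empty line; simpler, no
-- line list is built.

-- ===== PORT A =====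
-- split('\n'): the separator "\n" is non-empty, so PySem.Str.split? is always `some`; `.getD []` is exact
def norm_line_py (s : Option String) : Option String :=
  match s with
  | none => none
  | some s =>
    let s2 := PySem.Str.strip (PySem.Str.replace s "\r\n" "\n")
    let lines := (((PySem.Str.split? s2 "\n").getD []).filter
        (fun ln => PySem.Str.strip ln != "")).map PySem.Str.rstrip
    if lines = [] then none
    else (PySem.List.pyGet? lines (-1)).map PySem.Str.strip

-- ===== PORT B =====
-- `t[t.rfind('\n') + 1:]` : rfind returns -1 when '\n' is absent, so the slice start
-- is always ≥ 0; PySem.Str.rfind / PySem.Str.slice are exact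
def norm_line_py_alt (s : Option String) : Option String :=
  match s with
  | none => none
  | some s =>
    let t := PySem.Str.strip (PySem.Str.replace s "\r\n" "\n")
    if t = "" then none
    else some (PySem.Str.strip (PySem.Str.slice t (some (PySem.Str.rfind t "\n" + 1)) none))

-- ===== PRECONDITION & SPEC =====
def Spec_norm_line_py (s : Option String) (out : Option String) : Prop := out = norm_line_py_alt s
instance (s : Option String) (out : Option String) : Decidable (Spec_norm_line_py s out) := by unfold Spec_norm_line_py; infer_instance

-- ===== CLAIM (what is proved, stated in full; the proofs are below) =====
def Claim_equal_norm_line_py : Prop := ∀ (s : Option String), Dom_norm_line_py s → Spec_norm_line_py s (norm_line_py s)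

-- ===== LEMMAS AND PROOFS =====

-- structural version of PySem.Chars.splitOn on the single-character separator '\n'
def mySplit : List Char → List (List Char)
  | [] => [[]]
  | a :: l => if a = '\n' then [] :: mySplit l
              else (a :: (mySplit l).headD []) :: (mySplit l).tail

theorem mySplit_ne_nil (l : List Char) : mySplit l ≠ [] := by
  cases l with
  | nil => simp [mySplit]
  | cons a l => by_cases h : a = '\n' <;> simp [mySplit, h]

theorem pref_singleton (c : Char) (xs : List Char) :
    List.isPrefixOf [c] xs = true ↔ xs.head? = some c := by
  cases xs with
  | nil => simp [List.isPrefixOf]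
  | cons x t =>
    simp [List.isPrefixOf]
    constructor
    · intro h; simp [h]
    · intro h; simp [h]

theorem pref_singleton_false (c : Char) (xs : List Char) (h : xs.head? ≠ some c) :
    List.isPrefixOf [c] xs = false := by
  rw [Bool.eq_false_iff]
  intro hh
  exact h ((pref_singleton c xs).mp hh)

theorem go_eq_nil (sep : List Char) (f : Nat) (cur : List Char) (acc : List (List Char)) :
    PySem.Chars.splitOn.go sep (f + 1) [] cur acc = (cur.reverse :: acc).reverse := by
  rw [PySem.Chars.splitOn.go]
  omega

theorem go_eq_cons (sep : List Char) (f : Nat) (c : Char) (rest cur : List Char)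
    (acc : List (List Char)) :
    PySem.Chars.splitOn.go sep (f + 1) (c :: rest) cur acc =
      if sep.isPrefixOf (c :: rest) then
        PySem.Chars.splitOn.go sep f (List.drop sep.length (c :: rest)) [] (cur.reverse :: acc)
      else PySem.Chars.splitOn.go sep f rest (c :: cur) acc := by
  rw [PySem.Chars.splitOn.go]

theorem mySplit_dest (l : List Char) : ∃ h0 t0, mySplit l = h0 :: t0 := by
  cases hx : mySplit l with
  | nil => exact absurd hx (mySplit_ne_nil l)
  | cons a b => exact ⟨a, b, rfl⟩

theorem go_split : ∀ (fuel : Nat) (l cur : List Char) (acc : List (List Char)),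
    l.length < fuel →
    PySem.Chars.splitOn.go ['\n'] fuel l cur acc =
      acc.reverse ++ ((cur.reverse ++ (mySplit l).headD []) :: (mySplit l).tail) := by
  intro fuel
  induction fuel with
  | zero => intro l cur acc h; omega
  | succ f ih =>
    intro l cur acc h
    cases l with
    | nil => rw [go_eq_nil]; simp [mySplit]
    | cons c rest =>
      rw [go_eq_cons]
      by_cases hc : c = '\n'
      · rw [if_pos ((pref_singleton '\n' (c :: rest)).mpr (by simp [hc]))]
        simp only [List.length_cons, List.length_nil, List.drop_succ_cons, List.drop_zero]
        rw [ih rest [] (cur.reverse :: acc) (by simp at h; omega)]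
        obtain ⟨h0, t0, hms⟩ := mySplit_dest rest
        rw [show mySplit (c :: rest) = [] :: mySplit rest from by simp [mySplit, hc], hms]
        simp
      · rw [if_neg (fun hh => hc (Option.some.inj ((pref_singleton '\n' (c :: rest)).mp hh)))]
        rw [ih rest (c :: cur) acc (by simp at h ⊢; omega)]
        obtain ⟨h0, t0, hms⟩ := mySplit_dest rest
        rw [show mySplit (c :: rest) = (c :: (mySplit rest).headD []) :: (mySplit rest).tail
              from by simp [mySplit, hc], hms]
        simp

theorem splitOn_eq_mySplit (cs : List Char) :
    PySem.Chars.splitOn cs ['\n'] = mySplit cs := by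
  unfold PySem.Chars.splitOn
  rw [go_split (cs.length + 1) cs [] [] (by omega)]
  obtain ⟨h0, t0, hms⟩ := mySplit_dest cs
  rw [hms]
  simp

theorem mySplit_no_nl (l : List Char) (h : '\n' ∉ l) : mySplit l = [l] := by
  induction l with
  | nil => rfl
  | cons a t ih =>
    have ha : a ≠ '\n' := fun e => h (by simp [e])
    have ht : '\n' ∉ t := fun m => h (by simp [m])
    simp [mySplit, ha, ih ht]

theorem mySplit_two (l : List Char) (h : '\n' ∈ l) : 2 ≤ (mySplit l).length := by
  induction l with
  | nil => simp at h
  | cons a t ih =>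
    by_cases ha : a = '\n'
    · have := mySplit_ne_nil t
      simp [mySplit, ha]
      cases hms : mySplit t with
      | nil => exact absurd hms this
      | cons x xs => simp
    · have ht : '\n' ∈ t := by
        rcases List.mem_cons.mp h with e | m
        · exact absurd e.symm ha
        · exact m
      have h2 := ih ht
      cases hms : mySplit t with
      | nil => exact absurd hms (mySplit_ne_nil t)
      | cons x xs => simp [mySplit, ha, hms]; rw [hms] at h2; simpa using h2

theorem takeWhile_ne_of_mem {p : Char → Bool} {l : List Char} {c : Char}
    (hm : c ∈ l) (hc : p c = false) : List.takeWhile p l ≠ l := by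
  intro he
  have := List.mem_takeWhile_imp (p := p) (l := l) (x := c) (by rw [he]; exact hm)
  rw [hc] at this; exact Bool.false_ne_true this

theorem takeWhile_all {p : Char → Bool} {l : List Char}
    (h : ∀ x ∈ l, p x = true) : List.takeWhile p l = l := by
  induction l with
  | nil => rfl
  | cons a t ih =>
    rw [List.takeWhile_cons, h a (by simp)]
    simp [ih (fun x hx => h x (by simp [hx]))]

theorem mySplit_getLast (cs : List Char) :
    (mySplit cs).getLast? =
      some ((List.takeWhile (fun x => !(x == '\n')) cs.reverse).reverse) := by
  induction cs with
  | nil => rfl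
  | cons a l ih =>
    have hrev : (a :: l).reverse = l.reverse ++ [a] := by simp
    by_cases hmem : '\n' ∈ l
    · have hne : List.takeWhile (fun x => !(x == '\n')) l.reverse ≠ l.reverse :=
        takeWhile_ne_of_mem (by simpa using hmem) (by simp)
      have hlen : ¬ ((List.takeWhile (fun x => !(x == '\n')) l.reverse).length = l.reverse.length) := by
        intro he
        exact hne (List.IsPrefix.eq_of_length (List.takeWhile_prefix _) he)
      rw [hrev, List.takeWhile_append, if_neg hlen]
      by_cases ha : a = '\n'
      · rw [show mySplit (a :: l) = [] :: mySplit l from by simp [mySplit, ha]]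
        cases hms : mySplit l with
        | nil => exact absurd hms (mySplit_ne_nil l)
        | cons x xs =>
          rw [List.getLast?_cons]
          rw [hms] at ih
          simpa [List.getLast?_cons] using ih
      · have h2 := mySplit_two l hmem
        cases hms : mySplit l with
        | nil => exact absurd hms (mySplit_ne_nil l)
        | cons x xs =>
          rw [hms] at h2
          cases xs with
          | nil => simp at h2
          | cons y ys =>
            rw [show mySplit (a :: l) = (a :: (mySplit l).headD []) :: (mySplit l).tail
                  from by simp [mySplit, ha], hms]
            rw [hms] at ih
            simpa [List.getLast?_cons] using ih
    · have hall : List.takeWhile (fun x => !(x == '\n')) l.reverse = l.reverse :=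
        takeWhile_all (fun x hx => by
          simp only [Bool.not_eq_eq_eq_not, Bool.not_true, beq_eq_false_iff_ne]
          intro e; exact hmem (by rw [← e]; exact List.mem_reverse.mp hx))
      rw [hrev, List.takeWhile_append, if_pos (by rw [hall])]
      by_cases ha : a = '\n'
      · rw [show mySplit (a :: l) = [] :: mySplit l from by simp [mySplit, ha],
            mySplit_no_nl l hmem]
        simp [ha]
      · rw [show mySplit (a :: l) = (a :: (mySplit l).headD []) :: (mySplit l).tail
              from by simp [mySplit, ha], mySplit_no_nl l hmem]
        simp [ha]

-- rfind.go characterisation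
theorem rfind_go_none : ∀ (j : Nat) (s : List Char),
    (∀ k, k ≤ j → s[k]? ≠ some '\n') → PySem.Chars.rfind.go s ['\n'] j = -1 := by
  intro j
  induction j with
  | zero =>
    intro s h
    rw [PySem.Chars.rfind.go]
    have : List.isPrefixOf ['\n'] s = false :=
      pref_singleton_false _ _ (by rw [List.head?_eq_getElem?]; exact h 0 (le_refl 0))
    simp [this]
  | succ j ih =>
    intro s h
    rw [PySem.Chars.rfind.go]
    have : List.isPrefixOf ['\n'] (List.drop (j + 1) s) = false :=
      pref_singleton_false _ _ (by rw [List.head?_drop]; exact h (j+1) (le_refl _))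
    simp only [this, Bool.false_eq_true, if_false]
    exact ih s (fun k hk => h k (by omega))

theorem rfind_go_find : ∀ (j : Nat) (s : List Char) (i : Nat),
    s[i]? = some '\n' → (∀ k, i < k → k ≤ j → s[k]? ≠ some '\n') → i ≤ j →
    PySem.Chars.rfind.go s ['\n'] j = (i : Int) := by
  intro j
  induction j with
  | zero =>
    intro s i hi _ hij
    have : i = 0 := by omega
    subst this
    rw [PySem.Chars.rfind.go]
    have : List.isPrefixOf ['\n'] s = true :=
      (pref_singleton _ _).mpr (by rw [List.head?_eq_getElem?]; exact hi)
    simp [this]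
  | succ j ih =>
    intro s i hi hmax hij
    rw [PySem.Chars.rfind.go]
    by_cases he : i = j + 1
    · subst he
      have : List.isPrefixOf ['\n'] (List.drop (j + 1) s) = true :=
        (pref_singleton _ _).mpr (by rw [List.head?_drop]; exact hi)
      simp [this]
    · have hle : i ≤ j := by omega
      have : List.isPrefixOf ['\n'] (List.drop (j + 1) s) = false :=
        pref_singleton_false _ _ (by rw [List.head?_drop]; exact hmax (j+1) (by omega) (le_refl _))
      simp only [this, Bool.false_eq_true, if_false]
      exact ih s i hi (fun k h1 h2 => hmax k h1 (by omega)) hle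

-- generic getLast? lemmas
theorem pyGet?_neg_one {α : Type} (l : List α) : PySem.List.pyGet? l (-1) = l.getLast? := by
  cases l with
  | nil => rfl
  | cons a t =>
    simp [PySem.List.pyGet?, PySem.List.pyIdx?, List.getLast?_eq_getElem?]

theorem filter_getLast {α : Type} (p : α → Bool) :
    ∀ (l : List α) (x : α), l.getLast? = some x → p x = true →
    (l.filter p).getLast? = some x := by
  intro l
  induction l with
  | nil => intro x h; simp at h
  | cons a t ih =>
    intro x h hp
    cases t with
    | nil =>
      simp at h; subst h
      simp [List.filter, hp]
    | cons b t' =>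
      have h' : (b :: t').getLast? = some x := by
        simpa [List.getLast?_cons] using h
      have hf := ih x h' hp
      have hfe : (b :: t').filter p ≠ [] := by
        intro e; rw [e] at hf; simp at hf
      rw [List.filter_cons]
      by_cases hpa : p a = true
      · simp only [hpa, if_true]
        cases hfc : (b :: t').filter p with
        | nil => exact absurd hfc hfe
        | cons y ys =>
          rw [hfc] at hf
          simpa [List.getLast?_cons] using hf
      · simp only [hpa]
        exact hf

-- rstrip/strip facts (strip ∘ rstrip = strip)
theorem pv_dropWhile_idem (p : Char → Bool) (l : List Char) :
    List.dropWhile p (List.dropWhile p l) = List.dropWhile p l := by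
  induction l with
  | nil => rfl
  | cons a t ih =>
    by_cases h : p a = true
    · simpa [h] using ih
    · simp [h]

theorem pv_rstrip_reverse (cs : List Char) :
    (PySem.Chars.rstrip cs).reverse = List.dropWhile PySem.Chars.isspace cs.reverse := by
  simp [PySem.Chars.rstrip]

theorem pv_rstrip_idem (cs : List Char) :
    PySem.Chars.rstrip (PySem.Chars.rstrip cs) = PySem.Chars.rstrip cs := by
  simp [PySem.Chars.rstrip, pv_dropWhile_idem]

theorem pv_rstrip_cons (c : Char) (cs : List Char) :
    PySem.Chars.rstrip (c :: cs) =
      if cs.all PySem.Chars.isspace then (if PySem.Chars.isspace c then [] else [c])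
      else c :: PySem.Chars.rstrip cs := by
  simp only [PySem.Chars.rstrip, List.reverse_cons, List.dropWhile_append]
  by_cases hall : cs.all PySem.Chars.isspace
  · have : List.dropWhile PySem.Chars.isspace cs.reverse = [] := by
      rw [List.dropWhile_eq_nil_iff]
      intro x hx; exact List.all_eq_true.mp hall x (List.mem_reverse.mp hx)
    by_cases hc : PySem.Chars.isspace c <;> simp [this, hall, hc]
  · have : ¬ (List.dropWhile PySem.Chars.isspace cs.reverse = []) := by
      rw [List.dropWhile_eq_nil_iff]
      intro h
      exact hall (List.all_eq_true.mpr (fun x hx => h x (List.mem_reverse.mpr hx)))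
    simp [this, hall, List.isEmpty_iff]

theorem pv_lstrip_rstrip (cs : List Char) :
    PySem.Chars.lstrip (PySem.Chars.rstrip cs) = PySem.Chars.rstrip (PySem.Chars.lstrip cs) := by
  induction cs with
  | nil => rfl
  | cons c cs ih =>
    by_cases hc : PySem.Chars.isspace c = true
    · rw [pv_rstrip_cons]
      by_cases hall : cs.all PySem.Chars.isspace
      · have h1 : PySem.Chars.lstrip cs = [] := by
          simp only [PySem.Chars.lstrip]
          rw [List.dropWhile_eq_nil_iff]
          intro x hx; exact List.all_eq_true.mp hall x hx
        rw [if_pos hall, if_pos hc]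
        have h4 : PySem.Chars.lstrip (c :: cs) = PySem.Chars.lstrip cs := by
          simp [PySem.Chars.lstrip, hc]
        rw [h4, h1]; rfl
      · rw [if_neg hall]
        have h2 : PySem.Chars.lstrip (c :: PySem.Chars.rstrip cs) =
            PySem.Chars.lstrip (PySem.Chars.rstrip cs) := by
          simp [PySem.Chars.lstrip, hc]
        rw [h2, ih]
        simp [PySem.Chars.lstrip, hc]
    · have h3 : PySem.Chars.lstrip (c :: cs) = c :: cs := by
        simp [PySem.Chars.lstrip, hc]
      rw [pv_rstrip_cons, h3]
      by_cases hall : cs.all PySem.Chars.isspace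
      · simp [hall, hc, PySem.Chars.lstrip, pv_rstrip_cons]
      · simp [hall, PySem.Chars.lstrip, hc, pv_rstrip_cons]

theorem pv_strip_rstrip_chars (cs : List Char) :
    PySem.Chars.strip (PySem.Chars.rstrip cs) = PySem.Chars.strip cs := by
  simp only [PySem.Chars.strip]
  rw [pv_lstrip_rstrip, pv_rstrip_idem]

theorem dropWhile_head_false {p : Char → Bool} {l : List Char} {c : Char} {rest : List Char}
    (h : List.dropWhile p l = c :: rest) : p c = false := by
  induction l with
  | nil => simp at h
  | cons a t ih =>
    rw [List.dropWhile_cons] at h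
    by_cases ha : p a = true
    · rw [if_pos ha] at h; exact ih h
    · rw [if_neg ha] at h
      cases h; simpa using ha

theorem mem_lstrip_of_nonspace {l : List Char} {c : Char}
    (hm : c ∈ l) (hc : PySem.Chars.isspace c = false) : c ∈ PySem.Chars.lstrip l := by
  have : c ∈ List.takeWhile PySem.Chars.isspace l ++ List.dropWhile PySem.Chars.isspace l := by
    rw [List.takeWhile_append_dropWhile]; exact hm
  rcases List.mem_append.mp this with h | h
  · have := List.mem_takeWhile_imp h
    rw [hc] at this; exact absurd this Bool.false_ne_true
  · exact h

theorem strip_ne_nil_of_mem {l : List Char} {c : Char}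
    (hm : c ∈ l) (hc : PySem.Chars.isspace c = false) : PySem.Chars.strip l ≠ [] := by
  intro he
  have h1 : c ∈ PySem.Chars.lstrip l := mem_lstrip_of_nonspace hm hc
  have h2 : (PySem.Chars.rstrip (PySem.Chars.lstrip l)).reverse = [] := by
    rw [show PySem.Chars.rstrip (PySem.Chars.lstrip l) = PySem.Chars.strip l from rfl, he]
    rfl
  rw [pv_rstrip_reverse, List.dropWhile_eq_nil_iff] at h2
  have := h2 c (List.mem_reverse.mpr h1)
  rw [hc] at this; exact absurd this Bool.false_ne_true

-- the heart: A's pipeline on an already-stripped string equals B's rfind-slice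
set_option maxHeartbeats 1600000 in
theorem main_eq (y t : String) (ht : t = PySem.Str.strip y) :
    (if ((((PySem.Str.split? t "\n").getD []).filter
          (fun ln => PySem.Str.strip ln != "")).map PySem.Str.rstrip) = [] then none
     else (PySem.List.pyGet? ((((PySem.Str.split? t "\n").getD []).filter
          (fun ln => PySem.Str.strip ln != "")).map PySem.Str.rstrip) (-1)).map PySem.Str.strip)
    = (if t = "" then none
       else some (PySem.Str.strip (PySem.Str.slice t (some (PySem.Str.rfind t "\n" + 1)) none))) := by
  have hsplit : PySem.Str.split? t "\n" = some ((mySplit t.toList).map String.ofList) := by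
    have h0 : PySem.Chars.split? t.toList ['\n'] = some (mySplit t.toList) := by
      rw [PySem.Chars.split?]
      simp [splitOn_eq_mySplit]
    have h1 := PySem.Str.split?_map t "\n"
    rw [show ("\n" : String).toList = ['\n'] from rfl, h0] at h1
    cases hs : PySem.Str.split? t "\n" with
    | none => rw [hs] at h1; simp at h1
    | some parts =>
      rw [hs] at h1
      simp only [Option.map_some, Option.some.injEq] at h1
      congr 1
      have h2 := congrArg (List.map String.ofList) h1
      rw [List.map_map] at h2
      rw [← h2]
      have h3 : (String.ofList ∘ String.toList) = (id : String → String) :=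
        funext fun x => String.ofList_toList (s := x)
      rw [h3, List.map_id]
  by_cases hnil : t.toList = []
  · have ht0 : t = "" := by
      rw [← String.toList_inj, hnil]; rfl
    subst ht0
    rw [hsplit]
    norm_num [mySplit]
    intro h
    exact absurd (by decide) h
  · have hne : t ≠ "" := by
      intro e; rw [e] at hnil; exact hnil rfl
    -- t is stripped, so its reversal starts with a non-space character
    obtain ⟨c, rest, hrev, hc⟩ :
        ∃ c rest, t.toList.reverse = c :: rest ∧ PySem.Chars.isspace c = false := by
      have h2 : t.toList.reverse = List.dropWhile PySem.Chars.isspace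
          (PySem.Chars.lstrip y.toList).reverse := by
        rw [ht, PySem.Str.toList_strip, PySem.Chars.strip, pv_rstrip_reverse]
      cases hcase : t.toList.reverse with
      | nil => exact absurd (by simpa using congrArg List.reverse hcase) hnil
      | cons c rest =>
        exact ⟨c, rest, rfl, dropWhile_head_false (by rw [← h2, hcase])⟩
    have hcn : (!(c == '\n')) = true := by
      have : c ≠ '\n' := by
        intro e; rw [e] at hc; exact absurd hc (by decide)
      simpa using this
    -- the last line, as characters
    set p : Char → Bool := fun x => !(x == '\n') with hp
    set tw : List Char := List.takeWhile p t.toList.reverse with htw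
    have hpc : p c = true := hcn
    have htwc : tw = c :: List.takeWhile p rest := by
      rw [htw, hrev, List.takeWhile_cons, if_pos hpc]
    have hcm : c ∈ tw.reverse := by rw [htwc]; simp
    -- A side: last element of the filtered list
    have hgl : ((mySplit t.toList).map String.ofList).getLast? = some (String.ofList tw.reverse) := by
      rw [List.getLast?_map, mySplit_getLast]; rfl
    have hsne : PySem.Chars.strip tw.reverse ≠ [] := strip_ne_nil_of_mem hcm hc
    have hpred : (PySem.Str.strip (String.ofList tw.reverse) != "") = true := by
      rw [bne_iff_ne]
      intro e
      apply hsne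
      have he := congrArg String.toList e
      rw [PySem.Str.toList_strip, String.toList_ofList] at he
      simpa using he
    have hfl := filter_getLast (fun ln => PySem.Str.strip ln != "") _ _ hgl hpred
    have hfilter : ((((mySplit t.toList).map String.ofList).filter
        (fun ln => PySem.Str.strip ln != "")).map PySem.Str.rstrip).getLast?
        = some (PySem.Str.rstrip (String.ofList tw.reverse)) := by
      rw [List.getLast?_map, hfl]
      rfl
    have hlnil : ((((mySplit t.toList).map String.ofList).filter
        (fun ln => PySem.Str.strip ln != "")).map PySem.Str.rstrip) ≠ [] := by
      intro e; rw [e] at hfilter; simp at hfilter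
    rw [hsplit]
    simp only [Option.getD_some]
    rw [if_neg hlnil, if_neg hne, pyGet?_neg_one, hfilter, Option.map_some]
    -- B side: the slice after the last newline is tw.reverse
    have hBslice : (PySem.Str.slice t (some (PySem.Str.rfind t "\n" + 1)) none).toList
        = tw.reverse := by
      have hlen : tw.length ≤ t.toList.length := by
        calc tw.length ≤ t.toList.reverse.length := (List.takeWhile_sublist p).length_le
        _ = t.toList.length := by simp
      have hrfind : PySem.Str.rfind t "\n" + 1 = ((t.toList.length - tw.length : Nat) : Int) := by
        rw [PySem.Str.rfind_eq, show ("\n" : String).toList = ['\n'] from rfl]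
        unfold PySem.Chars.rfind
        by_cases hmem : '\n' ∈ t.toList
        · -- tw is a proper prefix of the reversal; the char after it is '\n'
          have htwne : tw ≠ t.toList.reverse :=
            takeWhile_ne_of_mem (l := t.toList.reverse) (by simpa using hmem) (by simp [hp])
          have hlt : tw.length < t.toList.length := by
            rcases lt_or_eq_of_le hlen with h | h
            · exact h
            · exfalso
              apply htwne
              apply List.IsPrefix.eq_of_length (List.takeWhile_prefix p)
              simpa using h
          have hdw : List.dropWhile p t.toList.reverse ≠ [] := by
            intro e
            apply htwne
            have h3 := List.takeWhile_append_dropWhile (p := p) (l := t.toList.reverse)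
            rw [e, List.append_nil] at h3
            rw [htw]; exact h3
          obtain ⟨d, ds, hds⟩ : ∃ d ds, List.dropWhile p t.toList.reverse = d :: ds := by
            cases hx : List.dropWhile p t.toList.reverse with
            | nil => exact absurd hx hdw
            | cons d ds => exact ⟨d, ds, rfl⟩
          have hd : d = '\n' := by
            have := dropWhile_head_false hds
            simpa [hp] using this
          have hidx : t.toList.reverse[tw.length]? = some '\n' := by
            have : t.toList.reverse = tw ++ List.dropWhile p t.toList.reverse :=
              (List.takeWhile_append_dropWhile).symm
            rw [this, hds, List.getElem?_append_right (by omega)]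
            simp [hd]
          -- translate to an index in t.toList
          have hidx' : t.toList[t.toList.length - 1 - tw.length]? = some '\n' := by
            rw [← List.getElem?_reverse (by simpa using hlt)]
            simpa using hidx
          have hmax : ∀ k, t.toList.length - 1 - tw.length < k → k ≤ t.toList.length →
              t.toList[k]? ≠ some '\n' := by
            intro k hk1 hk2 hcontra
            have hklt : k < t.toList.length := by
              by_contra h
              rw [List.getElem?_eq_none (by omega)] at hcontra
              simp at hcontra
            have hrevk : t.toList.reverse[t.toList.length - 1 - k]? = some '\n' := by
              rw [List.getElem?_reverse (by omega)]
              rw [show t.toList.length - 1 - (t.toList.length - 1 - k) = k from by omega]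
              exact hcontra
            have hsmall : t.toList.length - 1 - k < tw.length := by omega
            have : ('\n') ∈ tw := by
              have htake : tw = List.take tw.length t.toList.reverse :=
                List.prefix_iff_eq_take.mp (List.takeWhile_prefix p)
              have : tw[t.toList.length - 1 - k]? = some '\n' := by
                rw [htake, List.getElem?_take_of_lt hsmall]
                exact hrevk
              exact List.mem_of_getElem? this
            rw [htw] at this
            have := List.mem_takeWhile_imp this
            simp [hp] at this
          have := rfind_go_find t.toList.length t.toList (t.toList.length - 1 - tw.length)
            hidx' hmax (by omega)
          rw [this]
          omega
        · -- no newline: rfind = -1 and tw is everything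
          have hnone : ∀ k, k ≤ t.toList.length → t.toList[k]? ≠ some '\n' := by
            intro k _ hcontra
            exact hmem (List.mem_of_getElem? hcontra)
          rw [rfind_go_none t.toList.length t.toList hnone]
          have htww : List.takeWhile p t.toList.reverse = t.toList.reverse :=
            takeWhile_all (fun x hx => by
              simp only [hp, Bool.not_eq_eq_eq_not, Bool.not_true, beq_eq_false_iff_ne]
              intro e; exact hmem (by rw [← e]; exact List.mem_reverse.mp hx))
          have hl2 : tw.length = t.toList.length := by rw [htw, htww]; simp
          omega
      rw [hrfind, PySem.Str.toList_slice,
          PySem.Chars.slice_eq_listSlice, PySem.List.slice_from_natCast]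
      conv_rhs => rw [show tw = List.take tw.length t.toList.reverse from
            List.prefix_iff_eq_take.mp (List.takeWhile_prefix p)]
      rw [List.take_reverse, List.reverse_reverse]
    -- both sides are strip of the same character list
    have hfin : PySem.Str.strip (PySem.Str.rstrip (String.ofList tw.reverse))
        = PySem.Str.strip (PySem.Str.slice t (some (PySem.Str.rfind t "\n" + 1)) none) := by
      rw [← String.toList_inj, PySem.Str.toList_strip, PySem.Str.toList_strip,
          PySem.Str.toList_rstrip, hBslice, String.toList_ofList]
      exact pv_strip_rstrip_chars tw.reverse
    exact congrArg some hfin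

-- ===== VERDICT (by name: the statement is the Claim_ definition above) =====
theorem norm_line_py_spec : Claim_equal_norm_line_py := by
  intro s _
  unfold Spec_norm_line_py norm_line_py norm_line_py_alt
  cases s with
  | none => rfl
  | some s =>
    exact main_eq (PySem.Str.replace s "\r\n" "\n") _ rfl
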